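-- pv_equiv track=rewrite | github.com/fegome90-cmd/trifecta_dope | scripts/skill_hub_cards_core.py | _parse_get_output
-- ===== SOURCE A (Python) =====
-- def _parse_get_output(output: str) -> dict[str, str]:
--     chunks: dict[str, str] = {}
--     current_ref: str | None = None
--     current_lines: list[str] = []
--
--     for line in output.splitlines():
--         if line.startswith("## [") and "]" in line:
--             if current_ref is not None:
--                 chunks[current_ref] = "\n".join(current_lines).strip()
--             current_ref = line.split("[", 1)[1].split("]", 1)[0]
--             current_lines = [line]
--             continue
--         if current_ref is not None:
--             current_lines.append(line)
--
--     if current_ref is not None: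
--         chunks[current_ref] = "\n".join(current_lines).strip()
--     return chunks
-- ===== SOURCE B (Python) =====
-- def _parse_get_output(output: str) -> dict[str, str]:
--     # Phase 1: group lines into (ref, text) segments by a single backward pass:
--     # pending holds the lines below the current position up to the next header.
--     pending: list[str] = []
--     segments: list[tuple[str, str]] = []
--     for line in reversed(output.splitlines()):
--         if line.startswith("## [") and "]" in line:
--             ref = line.split("[", 1)[1].split("]", 1)[0]
--             segments.insert(0, (ref, "\n".join([line] + pending).strip()))
--             pending = []
--         else:
--             pending.insert(0, line)
--     # Phase 2: build the dict in order (later duplicate refs overwrite earlier ones).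
--     chunks: dict[str, str] = {}
--     for ref, text in segments:
--         chunks[ref] = text
--     return chunks
-- ===== Notes on version B (the rewrite author's own statement) =====
-- stated objective: alternative
-- what changed: Replaced A's forward flush-on-boundary state machine (current_ref/current_lines mutated while inserting into the dict) by two separate phases: a backward grouping pass that turns the lines into a list of (ref, text) segments, then a plain dict-building pass over the segments.
import Mathlib
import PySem

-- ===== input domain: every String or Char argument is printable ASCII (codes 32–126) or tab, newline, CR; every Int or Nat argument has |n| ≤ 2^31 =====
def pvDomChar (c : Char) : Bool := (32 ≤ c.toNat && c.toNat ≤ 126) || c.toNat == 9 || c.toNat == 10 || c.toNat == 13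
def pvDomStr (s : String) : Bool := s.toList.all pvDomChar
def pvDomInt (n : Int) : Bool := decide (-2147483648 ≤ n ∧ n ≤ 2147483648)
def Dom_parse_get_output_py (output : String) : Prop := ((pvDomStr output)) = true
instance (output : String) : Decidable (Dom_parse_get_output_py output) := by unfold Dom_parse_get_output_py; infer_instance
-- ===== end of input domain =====

-- B replaces A's forward flush-on-boundary state machine by a backward grouping pass
-- into (ref, text) segments followed by a separate dict-building pass (objective: alternative).

-- shared helpers: both Pythons contain the identical header test and ref extraction
-- line.startswith("## [") and "]" in line
def pvIsHeader (l : String) : Bool :=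
  PySem.Str.startswith l "## [" && PySem.Str.isIn "]" l
-- line.split("[", 1)[1].split("]", 1)[0]; under the header guard "[" and the pieces
-- are always present, so the (.getD) defaults for the Option results are never taken
def pvRefOf (l : String) : String :=
  let p1 := (((PySem.Str.splitMax? l "[" 1).getD []) |> (PySem.List.pyGet? · 1)).getD ""
  (((PySem.Str.splitMax? p1 "]" 1).getD []) |> (PySem.List.pyGet? · 0)).getD ""

-- ===== PORT A =====
-- the for-loop with state (chunks, current_ref, current_lines)
def pvALoop (ls : List String) (chunks : PySem.Dict String String)
    (ref : Option String) (acc : List String) : PySem.Dict String String :=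
  match ls with
  | [] =>
    match ref with
    | some r => chunks.insert r (PySem.Str.strip (PySem.Str.join "\n" acc))
    | none => chunks
  | l :: rest =>
    if pvIsHeader l then
      let chunks' :=
        match ref with
        | some r => chunks.insert r (PySem.Str.strip (PySem.Str.join "\n" acc))
        | none => chunks
      pvALoop rest chunks' (some (pvRefOf l)) [l]
    else
      match ref with
      | some _ => pvALoop rest chunks ref (acc ++ [l])
      | none => pvALoop rest chunks ref acc

def parse_get_output_py (output : String) : List (String × String) :=
  (pvALoop (PySem.Str.splitlines output) PySem.Dict.empty none []).items

-- ===== PORT B =====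
-- phase 1: backward pass (the Python loop over reversed(lines) with insert(0, ·)
-- is exactly this structural right-recursion) returning (pending, segments)
def pvBGroup (ls : List String) : List String × List (String × String) :=
  match ls with
  | [] => ([], [])
  | l :: rest =>
    let (pending, segs) := pvBGroup rest
    if pvIsHeader l then
      ([], (pvRefOf l, PySem.Str.strip (PySem.Str.join "\n" (l :: pending))) :: segs)
    else
      (l :: pending, segs)

-- phase 2: build the dict from the segments in order
def parse_get_output_py_alt (output : String) : List (String × String) :=
  ((pvBGroup (PySem.Str.splitlines output)).2.foldl
    (fun d p => d.insert p.1 p.2) PySem.Dict.empty).items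

-- ===== PRECONDITION & SPEC =====
def Spec_parse_get_output_py (output : String) (out : List (String × String)) : Prop := out = parse_get_output_py_alt output
instance (output : String) (out : List (String × String)) : Decidable (Spec_parse_get_output_py output out) := by unfold Spec_parse_get_output_py; infer_instance

-- ===== CLAIM (what is proved, stated in full; the proofs are below) =====
def Claim_equal_parse_get_output_py : Prop := ∀ (output : String), Dom_parse_get_output_py output → Spec_parse_get_output_py output (parse_get_output_py output)

-- ===== LEMMAS AND PROOFS =====

-- A's loop with an open segment (some r, acc) = insert the segment completed by
-- B's pending lines, then the remaining segments
theorem pvALoop_some (ls : List String) (chunks : PySem.Dict String String)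
    (r : String) (acc : List String) :
    pvALoop ls chunks (some r) acc =
      ((r, PySem.Str.strip (PySem.Str.join "\n" (acc ++ (pvBGroup ls).1)))
          :: (pvBGroup ls).2).foldl (fun d p => d.insert p.1 p.2) chunks := by
  induction ls generalizing chunks r acc with
  | nil => simp [pvALoop, pvBGroup]
  | cons l rest ih =>
    by_cases h : pvIsHeader l = true
    · simp only [pvALoop, pvBGroup, h, if_pos]
      rw [ih]
      simp [List.foldl]
    · simp only [pvALoop, pvBGroup, h, if_neg, Bool.not_eq_true]
      rw [ih]
      simp

-- A's loop with no open segment = B's dict-building fold over the segments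
theorem pvALoop_none (ls : List String) (chunks : PySem.Dict String String) :
    pvALoop ls chunks none [] =
      (pvBGroup ls).2.foldl (fun d p => d.insert p.1 p.2) chunks := by
  induction ls generalizing chunks with
  | nil => simp [pvALoop, pvBGroup]
  | cons l rest ih =>
    by_cases h : pvIsHeader l = true
    · simp only [pvALoop, pvBGroup, h, if_pos]
      rw [pvALoop_some]
      simp [List.foldl]
    · simp only [pvALoop, pvBGroup, h, if_neg, Bool.not_eq_true]
      rw [ih]

-- ===== VERDICT (by name: the statement is the Claim_ definition above) =====
theorem parse_get_output_py_spec : Claim_equal_parse_get_output_py := by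
  intro output _
  unfold Spec_parse_get_output_py parse_get_output_py parse_get_output_py_alt
  rw [pvALoop_none]
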